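-- pv_equiv track=rewrite | github.com/NicolasPiron/crossmodal-sequences | seq_structure.py | calculate_pairwise_differences
-- ===== SOURCE A (Python) =====
-- def calculate_pairwise_differences(seq_structures):
--     ''' Calculate pairwise positional differences between sequences '''
--     keys = list(seq_structures.keys())
--     n = len(keys)
--     differences = {key: 0 for key in keys}
--     for i in range(n):
--         for j in range(i + 1, n):
--             diff = 0
--             for x, y in zip(seq_structures[keys[i]], seq_structures[keys[j]]): # zip the sequences together
--                 # to compare the elements by position
--                 if x != y:
--                     diff += 1
--             differences[keys[i]] += diff
--             differences[keys[j]] += diff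
--     return differences
-- ===== SOURCE B (Python) =====
-- def calculate_pairwise_differences(seq_structures):
--     ''' Calculate pairwise positional differences between sequences '''
--     seqs = list(seq_structures.values())
--     L = 0
--     for s in seqs:
--         L = max(L, len(s))
--     cols = []
--     for p in range(L):
--         col = [s[p] for s in seqs if p < len(s)]
--         f = {}
--         for x in col:
--             f[x] = f.get(x, 0) + 1
--         cols.append((len(col), f))
--     return {k: sum(m - f[x] for x, (m, f) in zip(seq_structures[k], cols))
--             for k in seq_structures}
-- ===== Notes on version B (the rewrite author's own statement) =====
-- stated objective: faster
-- what changed: Replaced the O(n^2*L) all-pairs zip comparison with per-position value-frequency tables: one pass builds, for each position, the count of sequences reaching it and a value counter, and each sequence's total is the sum over its positions of (present_count - count of its own value).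
import Mathlib
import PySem

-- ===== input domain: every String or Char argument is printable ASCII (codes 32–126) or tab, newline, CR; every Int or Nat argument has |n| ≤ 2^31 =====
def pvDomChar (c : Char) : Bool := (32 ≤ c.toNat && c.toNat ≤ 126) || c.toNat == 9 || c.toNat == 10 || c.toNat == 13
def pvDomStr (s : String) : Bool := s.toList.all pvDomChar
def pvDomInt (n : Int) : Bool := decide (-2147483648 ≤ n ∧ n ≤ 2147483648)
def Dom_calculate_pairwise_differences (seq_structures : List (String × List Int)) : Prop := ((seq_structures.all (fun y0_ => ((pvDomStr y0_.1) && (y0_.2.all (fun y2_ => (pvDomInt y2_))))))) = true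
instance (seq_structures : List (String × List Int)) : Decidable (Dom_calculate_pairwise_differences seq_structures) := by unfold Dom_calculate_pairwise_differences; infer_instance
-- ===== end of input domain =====

-- B replaces A's all-pairs zip comparison by per-position value-frequency tables (O(n·L) instead of O(n²·L)); equal return value proved below.

-- ===== PORT A =====
-- A's inner zip loop counting positional mismatches
def pvMismatch (a b : List Int) : Int :=
  (a.zip b).foldl (fun diff xy => if xy.1 ≠ xy.2 then diff + 1 else diff) 0

def calculate_pairwise_differences (seq_structures : List (String × List Int)) : List (String × Int) :=
  let d := PySem.Dict.ofList seq_structures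
  let keys := d.keys
  let n : Int := keys.length
  let differences : PySem.Dict String Int := keys.foldl (fun acc k => acc.insert k 0) PySem.Dict.empty
  let final := (PySem.List.pyRange 0 n 1).foldl (fun diffs i =>
    (PySem.List.pyRange (i+1) n 1).foldl (fun diffs j =>
      let ki := PySem.List.pyGetD keys i ""
      let kj := PySem.List.pyGetD keys j ""
      let diff := pvMismatch (d.getD ki []) (d.getD kj [])
      ((diffs.modify ki 0 (· + diff)).modify kj 0 (· + diff))) diffs) differences
  final.items

-- ===== PORT B =====
def calculate_pairwise_differences_alt (seq_structures : List (String × List Int)) : List (String × Int) :=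
  let d := PySem.Dict.ofList seq_structures
  let seqs := d.values
  let L : Int := seqs.foldl (fun acc s => max acc (s.length : Int)) 0
  let cols : List (Int × PySem.Dict Int Int) := (PySem.List.pyRange 0 L 1).map (fun p =>
    let col := (seqs.filter (fun s => p < (s.length : Int))).map (fun s => PySem.List.pyGetD s p 0)
    let f := col.foldl (fun f x => f.insert x (f.getD x 0 + 1)) PySem.Dict.empty
    ((col.length : Int), f))
  d.keys.map (fun k =>
    (k, ((d.getD k []).zip cols).foldl (fun acc xc => acc + (xc.2.1 - xc.2.2.getD xc.1 0)) 0))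

-- ===== PRECONDITION & SPEC =====
def Spec_calculate_pairwise_differences (seq_structures : List (String × List Int)) (out : List (String × Int)) : Prop := out = calculate_pairwise_differences_alt seq_structures
instance (seq_structures : List (String × List Int)) (out : List (String × Int)) : Decidable (Spec_calculate_pairwise_differences seq_structures out) := by unfold Spec_calculate_pairwise_differences; infer_instance

-- ===== CLAIM (what is proved, stated in full; the proofs are below) =====
def Claim_equal_calculate_pairwise_differences : Prop := ∀ (seq_structures : List (String × List Int)), Dom_calculate_pairwise_differences seq_structures → Spec_calculate_pairwise_differences seq_structures (calculate_pairwise_differences seq_structures)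

-- ===== LEMMAS AND PROOFS =====

-- canonical value: for key k, the sum over all stored sequences of the positional mismatch count
def pvT (d : PySem.Dict String (List Int)) (k : String) : Int :=
  (d.keys.map (fun j => pvMismatch (d.getD k []) (d.getD j []))).sum

-- 0/1 indicator of "position p is shared and differs"
def pvInd (a b : List Int) (p : Nat) : Int :=
  if ((p : Int) < (b.length : Int) ∧ b.getD p 0 ≠ a.getD p 0) then 1 else 0

lemma mm_countP (a b : List Int) :
    pvMismatch a b = ((a.zip b).countP (fun xy => decide (xy.1 ≠ xy.2)) : Int) := by
  unfold pvMismatch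
  rw [PySem.List.foldl_ite_add_one (fun xy : Int × Int => xy.1 ≠ xy.2)]
  simp

lemma mm_sum (a b : List Int) :
    pvMismatch a b = ∑ p ∈ Finset.range a.length, pvInd a b p := by
  induction a generalizing b with
  | nil => simp [pvMismatch]
  | cons x t ih =>
      cases b with
      | nil =>
          simp [pvMismatch]
          refine (Finset.sum_eq_zero ?_).symm
          intro p _; simp [pvInd]
      | cons y s =>
          rw [mm_countP]
          simp only [List.zip_cons_cons, List.countP_cons]
          rw [show (x :: t).length = t.length + 1 from rfl, Finset.sum_range_succ']
          have e1 : ∀ p : Nat, pvInd (x :: t) (y :: s) (p + 1) = pvInd t s p := by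
            intro p
            simp only [pvInd, List.getD_cons_succ, List.length_cons]
            congr 1
            apply propext
            constructor
            · rintro ⟨h1, h2⟩; exact ⟨by push_cast at h1 ⊢; omega, h2⟩
            · rintro ⟨h1, h2⟩; exact ⟨by push_cast; omega, h2⟩
          have e0 : pvInd (x :: t) (y :: s) 0 = if (decide (x ≠ y) : Bool) then 1 else 0 := by
            simp only [pvInd, List.getD_cons_zero]
            by_cases h : x = y <;> simp [h, ne_comm]
          simp only [e1, e0]
          push_cast
          rw [show ((List.countP (fun xy => decide (xy.1 ≠ xy.2)) (t.zip s) : Int)) = pvMismatch t s from (mm_countP t s).symm, ih s]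

lemma mm_comm (a b : List Int) : pvMismatch a b = pvMismatch b a := by
  rw [mm_countP, mm_countP, ← List.zip_swap a b, List.countP_map]
  congr 2
  funext xy
  simp [Function.comp, ne_comm]

lemma mm_self (a : List Int) : pvMismatch a a = 0 := by
  rw [mm_sum]
  refine Finset.sum_eq_zero ?_
  intro p _; simp [pvInd]

-- list-sum ↔ Finset.range sum
lemma map_sum_range {α : Type} (l : List α) (f : α → Int) (dflt : α) :
    (l.map f).sum = ∑ i ∈ Finset.range l.length, f (l.getD i dflt) := by
  induction l with
  | nil => simp
  | cons x t ih => simp [Finset.sum_range_succ', ih, add_comm]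

-- swap a Finset sum with a list-map sum
lemma sum_comm_list {α : Type} (l : List α) (s : Finset ℕ) (g : ℕ → α → Int) :
    ∑ p ∈ s, (l.map (g p)).sum = (l.map (fun x => ∑ p ∈ s, g p x)).sum := by
  induction l with
  | nil => simp
  | cons x t ih => simp [Finset.sum_add_distrib, ih]

-- ===== A-side loop characterisation =====

lemma getD_init_zero (l : List String) (D : PySem.Dict String Int) (c : String) :
    (l.foldl (fun acc k => acc.insert k 0) D).getD c 0
      = if c ∈ l then 0 else D.getD c 0 := by
  induction l generalizing D with
  | nil => simp
  | cons k t ih =>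
      simp only [List.foldl_cons, ih, PySem.Dict.getD_insert, List.mem_cons]
      by_cases h1 : c ∈ t <;> by_cases h2 : c = k <;> simp [h1, h2]

lemma modify2_getD (D : PySem.Dict String Int) (k1 k2 c : String) (g : Int) :
    ((D.modify k1 0 (· + g)).modify k2 0 (· + g)).getD c 0
      = D.getD c 0 + ((if c = k1 then g else 0) + (if c = k2 then g else 0)) := by
  simp only [PySem.Dict.getD_modify]
  by_cases h12 : k1 = k2
  · subst h12
    by_cases h : c = k1
    · simp [h]; ring
    · simp [h]
  · by_cases h1 : c = k1 <;> by_cases h2 : c = k2 <;>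
      simp_all

lemma inner_getD (js : List Int) (k1 : String) (gf : Int → Int) (kf : Int → String)
    (D : PySem.Dict String Int) (c : String) :
    (js.foldl (fun D j => ((D.modify k1 0 (· + gf j)).modify (kf j) 0 (· + gf j))) D).getD c 0
      = D.getD c 0 + (js.map (fun j => (if c = k1 then gf j else 0) + (if c = kf j then gf j else 0))).sum := by
  induction js generalizing D with
  | nil => simp
  | cons j t ih => simp [ih, modify2_getD]; ring

lemma outer_getD (F : Int → PySem.Dict String Int → PySem.Dict String Int)
    (h : Int → String → Int) (is : List Int)
    (hF : ∀ i ∈ is, ∀ D c, (F i D).getD c 0 = D.getD c 0 + h i c)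
    (D : PySem.Dict String Int) (c : String) :
    (is.foldl (fun D i => F i D) D).getD c 0 = D.getD c 0 + (is.map (fun i => h i c)).sum := by
  induction is generalizing D with
  | nil => simp
  | cons i t ih =>
      simp only [List.foldl_cons, List.map_cons, List.sum_cons]
      rw [ih (fun i hi => hF i (by simp [hi])), hF i (by simp)]
      ring

lemma keys_modify_of_mem (D : PySem.Dict String Int) (k : String) (f : Int → Int)
    (h : k ∈ D.keys) : (D.modify k 0 f).keys = D.keys := by
  rw [PySem.Dict.keys_modify, PySem.Dict.keys_insert_of_contains]
  exact (PySem.Dict.contains_iff_mem_keys _ _).mpr h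

lemma inner_keys (js : List Int) (k1 : String) (gf : Int → Int) (kf : Int → String)
    (D : PySem.Dict String Int) (h1 : k1 ∈ D.keys) (h2 : ∀ j ∈ js, kf j ∈ D.keys) :
    (js.foldl (fun D j => ((D.modify k1 0 (· + gf j)).modify (kf j) 0 (· + gf j))) D).keys = D.keys := by
  induction js generalizing D with
  | nil => rfl
  | cons j t ih =>
      simp only [List.foldl_cons]
      have e1 : (D.modify k1 0 (· + gf j)).keys = D.keys := keys_modify_of_mem _ _ _ h1
      have e2 : ((D.modify k1 0 (· + gf j)).modify (kf j) 0 (· + gf j)).keys = D.keys := by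
        rw [keys_modify_of_mem _ _ _ (by rw [e1]; exact h2 j (by simp)), e1]
      rw [ih _ (by rw [e2]; exact h1) (fun j' hj' => by rw [e2]; exact h2 j' (by simp [hj'])), e2]

-- sum over pyRange ↑a ↑b as a Finset.Ico sum
lemma map_sum_pyRange (f : Int → Int) (a : Nat) : ∀ (b : Nat),
    ((PySem.List.pyRange (a : Int) (b : Int) 1).map f).sum = ∑ j ∈ Finset.Ico a b, f (j : Int) := by
  intro b
  induction b with
  | zero =>
      rw [PySem.List.pyRange_one_eq_nil (by exact_mod_cast Nat.zero_le a)]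
      simp
  | succ m ih =>
      by_cases h : a ≤ m
      · rw [show ((m + 1 : Nat) : Int) = (m : Int) + 1 by push_cast; ring,
            PySem.List.pyRange_one_succ_right (by exact_mod_cast h)]
        rw [List.map_append, List.sum_append, ih]
        rw [Finset.sum_Ico_succ_top h]
        simp
      · rw [PySem.List.pyRange_one_eq_nil (by exact_mod_cast (by omega : m + 1 ≤ a))]
        rw [Finset.Ico_eq_empty (by omega)]
        simp

-- generic keys preservation through the outer loop
lemma outer_keys (F : Int → PySem.Dict String Int → PySem.Dict String Int) (K0 : List String)
    (is : List Int) (hF : ∀ i ∈ is, ∀ D, D.keys = K0 → (F i D).keys = K0) :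
    ∀ D, D.keys = K0 → ((is.foldl (fun D i => F i D) D).keys = K0) := by
  induction is with
  | nil => intro D h; exact h
  | cons i t ih =>
      intro D h
      exact ih (fun i' hi' => hF i' (by simp [hi'])) _ (hF i (by simp) D h)

-- per-index mismatch table
def pvM (d : PySem.Dict String (List Int)) (i j : Nat) : Int :=
  pvMismatch (d.getD (d.keys.getD i "") []) (d.getD (d.keys.getD j "") [])

-- the double pair loop, summed for the key at index t
lemma map_sum_pyRange0 (f : Int → Int) (b : Nat) :
    ((PySem.List.pyRange 0 (b : Int) 1).map f).sum = ∑ j ∈ Finset.range b, f (j : Int) := by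
  have h := map_sum_pyRange f 0 b
  simp only [Nat.cast_zero] at h
  rw [h, Finset.range_eq_Ico]

lemma A_sum (d : PySem.Dict String (List Int)) (hnd : d.keys.Nodup) (t : Nat)
    (ht : t < d.keys.length) :
    ((PySem.List.pyRange 0 ((d.keys.length : Nat) : Int) 1).map (fun i =>
       ((PySem.List.pyRange (i + 1) ((d.keys.length : Nat) : Int) 1).map (fun j =>
          (if d.keys.getD t "" = PySem.List.pyGetD d.keys i "" then
             pvMismatch (d.getD (PySem.List.pyGetD d.keys i "") []) (d.getD (PySem.List.pyGetD d.keys j "") []) else 0) +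
          (if d.keys.getD t "" = PySem.List.pyGetD d.keys j "" then
             pvMismatch (d.getD (PySem.List.pyGetD d.keys i "") []) (d.getD (PySem.List.pyGetD d.keys j "") []) else 0))).sum)).sum
    = pvT d (d.keys.getD t "") := by
  set n := d.keys.length with hn
  have hinj : ∀ i < n, ∀ t' < n, (d.keys.getD t' "" = d.keys.getD i "" ↔ t' = i) := by
    intro i hi t' ht'
    rw [List.getD_eq_getElem _ _ hi, List.getD_eq_getElem _ _ ht']
    exact List.Nodup.getElem_inj_iff hnd
  rw [map_sum_pyRange0]
  have hstep : ∀ i ∈ Finset.range n,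
      ((PySem.List.pyRange ((i : Nat) + 1 : Int) ((n : Nat) : Int) 1).map (fun j =>
          (if d.keys.getD t "" = PySem.List.pyGetD d.keys (i : Nat) "" then
             pvMismatch (d.getD (PySem.List.pyGetD d.keys (i : Nat) "") []) (d.getD (PySem.List.pyGetD d.keys j "") []) else 0) +
          (if d.keys.getD t "" = PySem.List.pyGetD d.keys j "" then
             pvMismatch (d.getD (PySem.List.pyGetD d.keys (i : Nat) "") []) (d.getD (PySem.List.pyGetD d.keys j "") []) else 0))).sum
      = (if t = i then (∑ j ∈ Finset.Ico (i + 1) n, pvM d i j) else 0)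
        + (if i < t then pvM d t i else 0) := by
    intro i hmem
    have hi : i < n := Finset.mem_range.mp hmem
    rw [show ((i : Nat) + 1 : Int) = (((i + 1 : Nat) : Nat) : Int) by push_cast; ring,
        map_sum_pyRange]
    have hterm : ∀ j ∈ Finset.Ico (i + 1) n,
        ((if d.keys.getD t "" = PySem.List.pyGetD d.keys ((j : Nat) : Int) "" then
             pvMismatch (d.getD (PySem.List.pyGetD d.keys ((i : Nat) : Int) "") []) (d.getD (PySem.List.pyGetD d.keys ((j : Nat) : Int) "") []) else 0))
        = (if t = j then pvM d i j else 0) := by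
      intro j hj
      obtain ⟨hj1, hj2⟩ := Finset.mem_Ico.mp hj
      rw [PySem.List.pyGetD_natCast, PySem.List.pyGetD_natCast]
      rw [if_congr (hinj j hj2 t ht) rfl rfl]
      rfl
    have hterm1 : ∀ j ∈ Finset.Ico (i + 1) n,
        ((if d.keys.getD t "" = PySem.List.pyGetD d.keys ((i : Nat) : Int) "" then
             pvMismatch (d.getD (PySem.List.pyGetD d.keys ((i : Nat) : Int) "") []) (d.getD (PySem.List.pyGetD d.keys ((j : Nat) : Int) "") []) else 0))
        = (if t = i then pvM d i j else 0) := by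
      intro j hj
      obtain ⟨hj1, hj2⟩ := Finset.mem_Ico.mp hj
      rw [PySem.List.pyGetD_natCast, PySem.List.pyGetD_natCast]
      rw [if_congr (hinj i hi t ht) rfl rfl]
      rfl
    rw [Finset.sum_congr rfl (fun j hj => by rw [hterm j hj, hterm1 j hj]),
        Finset.sum_add_distrib]
    congr 1
    · by_cases hti : t = i
      · rw [if_pos hti]
        exact Finset.sum_congr rfl (fun j _ => if_pos hti)
      · rw [if_neg hti]
        exact Finset.sum_eq_zero (fun j _ => if_neg hti)
    · rw [Finset.sum_ite_eq (Finset.Ico (i + 1) n) t (fun j => pvM d i j)]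
      have hmm : pvM d i t = pvM d t i := mm_comm _ _
      by_cases hit : i < t
      · rw [if_pos (Finset.mem_Ico.mpr ⟨by omega, ht⟩), if_pos hit, hmm]
      · rw [if_neg (by rw [Finset.mem_Ico]; omega), if_neg hit]
  rw [Finset.sum_congr rfl hstep, Finset.sum_add_distrib,
      Finset.sum_ite_eq (Finset.range n) t (fun i => ∑ j ∈ Finset.Ico (i + 1) n, pvM d i j),
      if_pos (Finset.mem_range.mpr ht)]
  have hlow : ∑ i ∈ Finset.range n, (if i < t then pvM d t i else 0)
      = ∑ i ∈ Finset.Ico 0 t, pvM d t i := by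
    rw [Finset.range_eq_Ico, ← Finset.sum_Ico_consecutive _ (Nat.zero_le t) (le_of_lt ht)]
    have h1 : ∑ i ∈ Finset.Ico 0 t, (if i < t then pvM d t i else 0) = ∑ i ∈ Finset.Ico 0 t, pvM d t i :=
      Finset.sum_congr rfl (fun i hi => if_pos (Finset.mem_Ico.mp hi).2)
    have h2 : ∑ i ∈ Finset.Ico t n, (if i < t then pvM d t i else 0) = 0 :=
      Finset.sum_eq_zero (fun i hi => if_neg (by have := (Finset.mem_Ico.mp hi).1; omega))
    rw [h1, h2, add_zero]
  rw [hlow]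
  unfold pvT
  rw [map_sum_range _ _ ""]
  have hR : ∑ i ∈ Finset.range d.keys.length,
      pvMismatch (d.getD (d.keys.getD t "") []) (d.getD (d.keys.getD i "") [])
      = ∑ i ∈ Finset.range n, pvM d t i := by
    exact Finset.sum_congr rfl (fun i _ => rfl)
  rw [hR, Finset.range_eq_Ico, ← Finset.sum_Ico_consecutive _ (Nat.zero_le t) (le_of_lt ht),
      Finset.sum_eq_sum_Ico_succ_bot ht]
  have hz : pvM d t t = 0 := mm_self _
  rw [hz]
  ring

-- final A-side characterisation
lemma A_val (d : PySem.Dict String (List Int)) (hnd : d.keys.Nodup) :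
    ((PySem.List.pyRange 0 ((d.keys.length : Nat) : Int) 1).foldl (fun diffs i =>
        (PySem.List.pyRange (i + 1) ((d.keys.length : Nat) : Int) 1).foldl (fun diffs j =>
          ((diffs.modify (PySem.List.pyGetD d.keys i "") 0
              (· + pvMismatch (d.getD (PySem.List.pyGetD d.keys i "") []) (d.getD (PySem.List.pyGetD d.keys j "") []))).modify
            (PySem.List.pyGetD d.keys j "") 0
              (· + pvMismatch (d.getD (PySem.List.pyGetD d.keys i "") []) (d.getD (PySem.List.pyGetD d.keys j "") [])))) diffs)
      (d.keys.foldl (fun acc k => acc.insert k 0) PySem.Dict.empty)).items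
    = d.keys.map (fun k => (k, pvT d k)) := by
  set n := d.keys.length with hn
  have hinitkeys : (d.keys.foldl (fun acc k => acc.insert k 0) (PySem.Dict.empty : PySem.Dict String Int)).keys = d.keys := by
    rw [PySem.Dict.keys_foldl_insert, PySem.Dict.keys_empty, PySem.Set.update_nil_left,
        PySem.Set.ofList_eq_self_of_nodup _ hnd]
  have hmemK : ∀ (x : Int), 0 ≤ x → x < (n : Int) → PySem.List.pyGetD d.keys x "" ∈ d.keys := by
    intro x h0 h1
    rw [PySem.List.pyGetD_eq_getElem _ _ h0 (by exact_mod_cast h1)]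
    exact List.getElem_mem _
  have hkeys : ((PySem.List.pyRange 0 ((n : Nat) : Int) 1).foldl (fun diffs i =>
        (PySem.List.pyRange (i + 1) ((n : Nat) : Int) 1).foldl (fun diffs j =>
          ((diffs.modify (PySem.List.pyGetD d.keys i "") 0
              (· + pvMismatch (d.getD (PySem.List.pyGetD d.keys i "") []) (d.getD (PySem.List.pyGetD d.keys j "") []))).modify
            (PySem.List.pyGetD d.keys j "") 0
              (· + pvMismatch (d.getD (PySem.List.pyGetD d.keys i "") []) (d.getD (PySem.List.pyGetD d.keys j "") [])))) diffs)
      (d.keys.foldl (fun acc k => acc.insert k 0) PySem.Dict.empty)).keys = d.keys := by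
    apply outer_keys _ d.keys _ ?_ _ hinitkeys
    intro i hi D hD
    obtain ⟨hi0, hi1⟩ := PySem.List.mem_pyRange_one.mp hi
    rw [inner_keys _ _ _ _ D (by rw [hD]; exact hmemK i hi0 hi1) ?_]
    · exact hD
    · intro j hj
      obtain ⟨hj0, hj1⟩ := PySem.List.mem_pyRange_one.mp hj
      rw [hD]
      exact hmemK j (by omega) hj1
  have hgetD : ∀ c, ((PySem.List.pyRange 0 ((n : Nat) : Int) 1).foldl (fun diffs i =>
        (PySem.List.pyRange (i + 1) ((n : Nat) : Int) 1).foldl (fun diffs j =>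
          ((diffs.modify (PySem.List.pyGetD d.keys i "") 0
              (· + pvMismatch (d.getD (PySem.List.pyGetD d.keys i "") []) (d.getD (PySem.List.pyGetD d.keys j "") []))).modify
            (PySem.List.pyGetD d.keys j "") 0
              (· + pvMismatch (d.getD (PySem.List.pyGetD d.keys i "") []) (d.getD (PySem.List.pyGetD d.keys j "") [])))) diffs)
      (d.keys.foldl (fun acc k => acc.insert k 0) PySem.Dict.empty)).getD c 0
      = (d.keys.foldl (fun acc k => acc.insert k 0) PySem.Dict.empty).getD c 0
        + ((PySem.List.pyRange 0 ((n : Nat) : Int) 1).map (fun i =>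
            ((PySem.List.pyRange (i + 1) ((n : Nat) : Int) 1).map (fun j =>
              (if c = PySem.List.pyGetD d.keys i "" then
                 pvMismatch (d.getD (PySem.List.pyGetD d.keys i "") []) (d.getD (PySem.List.pyGetD d.keys j "") []) else 0) +
              (if c = PySem.List.pyGetD d.keys j "" then
                 pvMismatch (d.getD (PySem.List.pyGetD d.keys i "") []) (d.getD (PySem.List.pyGetD d.keys j "") []) else 0))).sum)).sum := by
    intro c
    exact outer_getD
      (fun i D => (PySem.List.pyRange (i + 1) ((n : Nat) : Int) 1).foldl (fun D j =>
          ((D.modify (PySem.List.pyGetD d.keys i "") 0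
              (· + pvMismatch (d.getD (PySem.List.pyGetD d.keys i "") []) (d.getD (PySem.List.pyGetD d.keys j "") []))).modify
            (PySem.List.pyGetD d.keys j "") 0
              (· + pvMismatch (d.getD (PySem.List.pyGetD d.keys i "") []) (d.getD (PySem.List.pyGetD d.keys j "") [])))) D)
      (fun i c => ((PySem.List.pyRange (i + 1) ((n : Nat) : Int) 1).map (fun j =>
              (if c = PySem.List.pyGetD d.keys i "" then
                 pvMismatch (d.getD (PySem.List.pyGetD d.keys i "") []) (d.getD (PySem.List.pyGetD d.keys j "") []) else 0) +
              (if c = PySem.List.pyGetD d.keys j "" then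
                 pvMismatch (d.getD (PySem.List.pyGetD d.keys i "") []) (d.getD (PySem.List.pyGetD d.keys j "") []) else 0))).sum)
      _ (fun i _ D c' => inner_getD _ _ _ _ D c') _ c
  rw [PySem.Dict.items_eq_map_keys _ (by rw [hkeys]; exact hnd) 0, hkeys]
  apply List.map_congr_left
  intro k hk
  apply congrArg (Prod.mk k)
  obtain ⟨t, ht, hkt⟩ := List.mem_iff_getElem.mp hk
  have hkt' : d.keys.getD t "" = k := by rw [List.getD_eq_getElem _ _ ht, hkt]
  rw [hgetD k, getD_init_zero, if_pos hk, ← hkt', zero_add]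
  exact A_sum d hnd t ht

lemma A_items (xs : List (String × List Int)) :
    calculate_pairwise_differences xs
      = (PySem.Dict.ofList xs).keys.map (fun k => (k, pvT (PySem.Dict.ofList xs) k)) := by
  have hnd := PySem.Dict.nodup_keys_ofList xs
  unfold calculate_pairwise_differences
  exact A_val (PySem.Dict.ofList xs) hnd

-- zip-with-defaults as an indexed sum
lemma zip_map_sum {β : Type} (w : Int × β → Int) (dβ : β) :
    ∀ (a : List Int) (b : List β), a.length ≤ b.length →
    ((a.zip b).map w).sum = ∑ p ∈ Finset.range a.length, w (a.getD p 0, b.getD p dβ) := by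
  intro a
  induction a with
  | nil => intro b _; simp
  | cons x t ih =>
      intro b hb
      cases b with
      | nil => simp at hb
      | cons y s =>
          simp only [List.zip_cons_cons, List.map_cons, List.sum_cons]
          rw [show (x :: t).length = t.length + 1 from rfl, Finset.sum_range_succ']
          simp only [List.getD_cons_succ, List.getD_cons_zero]
          rw [ih s (by simpa using hb)]
          ring

-- ===== B-side characterisation =====
lemma B_val (d : PySem.Dict String (List Int)) (hnd : d.keys.Nodup) (k : String) (hk : k ∈ d.keys) :
    List.foldl (fun acc (xc : Int × (Int × PySem.Dict Int Int)) => acc + (xc.2.1 - xc.2.2.getD xc.1 0)) 0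
      ((d.getD k []).zip
        ((PySem.List.pyRange 0 (List.foldl (fun acc s => max acc (s.length : Int)) 0 d.values) 1).map
          (fun p =>
            ((((d.values.filter (fun s => decide (p < (s.length : Int)))).map (fun s => PySem.List.pyGetD s p 0)).length : Int),
             ((d.values.filter (fun s => decide (p < (s.length : Int)))).map (fun s => PySem.List.pyGetD s p 0)).foldl
               (fun f x => f.insert x (f.getD x 0 + 1)) PySem.Dict.empty))))
    = pvT d k := by
  obtain ⟨hL0, hLub⟩ := PySem.List.le_foldl_max_int d.values (fun s => (s.length : Int)) 0
  set L := List.foldl (fun acc s => max acc ((s.length : Nat) : Int)) 0 d.values with hL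
  have hLN : ((L.toNat : Nat) : Int) = L := Int.toNat_of_nonneg hL0
  have hval : d.getD k [] ∈ d.values := by
    rw [PySem.Dict.values_eq_map_keys d hnd []]
    exact List.mem_map_of_mem hk
  have hlen : (d.getD k []).length ≤ L.toNat := by
    have := hLub _ hval
    omega
  rw [PySem.List.foldl_add, ← hLN, PySem.List.pyRange_zero_natCast, List.map_map,
      zip_map_sum _ ((0 : Int), (PySem.Dict.empty : PySem.Dict Int Int)) _ _
        (by simpa using hlen),
      zero_add]
  trans (∑ p ∈ Finset.range (d.getD k []).length,
      ((d.values.countP (fun s => (!(PySem.List.pyGetD s (p : Int) 0 == (d.getD k []).getD p 0))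
          && decide ((p : Int) < (s.length : Int)))) : Int))
  · refine Finset.sum_congr rfl fun p hp => ?_
    have hpL : p < L.toNat := lt_of_lt_of_le (Finset.mem_range.mp hp) hlen
    rw [PySem.List.getD_map_range _ _ _ _ hpL]
    simp only [Function.comp_apply]
    rw [PySem.Dict.foldl_insert_getD_add_one_eq_counter, PySem.Dict.getD_counter]
    set x := (d.getD k []).getD p 0
    set F := d.values.filter (fun s : List Int => decide ((p : Int) < (s.length : Int))) with hF
    rw [List.length_map, List.count_eq_countP, List.countP_map]
    simp only [Function.comp_def]
    have hsplit := List.length_eq_countP_add_countP (fun s : List Int => PySem.List.pyGetD s (p : Int) 0 == x) (l := F)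
    have e2 : List.countP (fun a : List Int => decide ¬(PySem.List.pyGetD a (p : Int) 0 == x) = true) F
        = List.countP (fun s : List Int => !(PySem.List.pyGetD s (p : Int) 0 == x)) F := by
      apply List.countP_congr; intro a _; simp
    rw [e2] at hsplit
    rw [hF] at *
    rw [List.countP_filter, List.countP_filter] at *
    omega
  · trans ((d.values.map (fun s => ∑ p ∈ Finset.range (d.getD k []).length,
        if (!(PySem.List.pyGetD s (p : Int) 0 == (d.getD k []).getD p 0))
            && decide ((p : Int) < (s.length : Int)) then (1 : Int) else 0)).sum)
    · rw [← sum_comm_list]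
      exact Finset.sum_congr rfl fun p _ => (PySem.List.sum_map_ite_one_zero _ _).symm
    · unfold pvT
      rw [PySem.Dict.values_eq_map_keys d hnd [], List.map_map]
      apply congrArg List.sum
      apply List.map_congr_left
      intro j _
      simp only [Function.comp_apply]
      rw [mm_sum]
      refine Finset.sum_congr rfl fun p _ => ?_
      rw [PySem.List.pyGetD_natCast]
      by_cases h1 : (p : Int) < (((d.getD j []).length : Nat) : Int)
      · simp [pvInd, h1]
      · simp [pvInd, h1]

lemma B_items (xs : List (String × List Int)) :
    calculate_pairwise_differences_alt xs
      = (PySem.Dict.ofList xs).keys.map (fun k => (k, pvT (PySem.Dict.ofList xs) k)) := by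
  have hnd := PySem.Dict.nodup_keys_ofList xs
  unfold calculate_pairwise_differences_alt
  apply List.map_congr_left
  intro k hk
  exact congrArg (Prod.mk k) (B_val (PySem.Dict.ofList xs) hnd k hk)

-- ===== VERDICT (by name: the statement is the Claim_ definition above) =====
theorem calculate_pairwise_differences_spec : Claim_equal_calculate_pairwise_differences := by
  intro xs _
  unfold Spec_calculate_pairwise_differences
  rw [A_items, B_items]
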